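-- pv_equiv track=rewrite | github.com/abdelrhman-alarabawy/Probabilistic-bitcoin-with-ML- | pipeline/gate_module_12h_v1/src/confusion_report.py | _insert_report_section
-- ===== SOURCE A (Python) =====
-- from typing import Dict, List, Tuple
--
-- def _insert_report_section(lines: List[str], section: List[str]) -> List[str]:
--     header = "## Trade vs Not-Trade Confusion (Top-K=20)"
--     start = None
--     for i, line in enumerate(lines):
--         if line.strip() == header:
--             start = i
--             break
--     if start is not None:
--         end = start + 1
--         while end < len(lines) and not lines[end].startswith("## "):
--             end += 1
--         lines = lines[:start] + lines[end:]
--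
--     insert_at = None
--     for i, line in enumerate(lines):
--         if line.strip() == "## Conclusion":
--             insert_at = i
--             break
--     if insert_at is None:
--         insert_at = len(lines)
--     return lines[:insert_at] + section + [""] + lines[insert_at:]
-- ===== SOURCE B (Python) =====
-- def _insert_report_section(lines, section):
--     header = "## Trade vs Not-Trade Confusion (Top-K=20)"
--     out = []
--     skipping = False
--     skipped = False
--     inserted = False
--     for line in lines:
--         if skipping:
--             if line.startswith("## "):
--                 skipping = False
--             else:
--                 continue
--         if not skipped and line.strip() == header:
--             skipping = True
--             skipped = True
--             continue
--         if not inserted and line.strip() == "## Conclusion":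
--             out.extend(section)
--             out.append("")
--             inserted = True
--         out.append(line)
--     if not inserted:
--         out.extend(section)
--         out.append("")
--     return out
-- ===== Notes on version B (the rewrite author's own statement) =====
-- stated objective: alternative
-- what changed: Replaces the two index-searching passes plus slice arithmetic with a single pass over lines driven by skipping/skipped/inserted flags that removes the old section and inserts the new one while copying.
import Mathlib
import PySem

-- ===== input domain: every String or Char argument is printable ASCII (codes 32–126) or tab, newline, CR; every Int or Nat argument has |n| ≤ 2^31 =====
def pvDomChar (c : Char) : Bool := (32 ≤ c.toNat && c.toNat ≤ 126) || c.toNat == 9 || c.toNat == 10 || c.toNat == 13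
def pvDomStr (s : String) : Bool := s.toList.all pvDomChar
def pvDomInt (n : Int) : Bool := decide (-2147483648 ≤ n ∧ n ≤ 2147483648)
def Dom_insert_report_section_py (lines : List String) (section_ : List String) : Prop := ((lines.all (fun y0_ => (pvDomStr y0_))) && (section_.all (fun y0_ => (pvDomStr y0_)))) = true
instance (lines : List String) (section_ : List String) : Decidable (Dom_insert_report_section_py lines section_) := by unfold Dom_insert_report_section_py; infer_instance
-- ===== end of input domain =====

-- B replaces A's two index-searching passes and slice arithmetic by one flag-driven pass (alternative decomposition, same cost); equivalence is about the return value (neither program mutates its arguments).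

-- ===== PORT A =====
-- 'for i, line in enumerate(lines): if line.strip() == target: <record i>; break' (A runs this loop twice, with two different targets)
def irsFindIdx (target : String) : List String → Nat → Option Nat
  | [], _ => none
  | l :: ls, i => if PySem.Str.strip l = target then some i else irsFindIdx target ls (i + 1)

-- 'while end < len(lines) and not lines[end].startswith("## "): end += 1'
def irsScanEnd (lines : List String) (e : Nat) : Nat :=
  if h : e < lines.length then
    if PySem.Str.startswith lines[e] "## " then e else irsScanEnd lines (e + 1)
  else e
termination_by lines.length - e

def insert_report_section_py (lines : List String) (section_ : List String) : List String :=
  let header := "## Trade vs Not-Trade Confusion (Top-K=20)"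
  let lines2 :=
    match irsFindIdx header lines 0 with
    | none => lines
    | some s =>
        let e := irsScanEnd lines (s + 1)
        PySem.List.slice lines none (some (s : Int)) ++ PySem.List.slice lines (some (e : Int)) none
  let insert_at :=
    match irsFindIdx "## Conclusion" lines2 0 with
    | none => lines2.length
    | some i => i
  PySem.List.slice lines2 none (some (insert_at : Int)) ++ section_ ++ [""] ++
    PySem.List.slice lines2 (some (insert_at : Int)) none

-- ===== PORT B =====
-- the single for-loop of Source B over the state (skipping, skipped, inserted, out)
def irsLoopB (section_ : List String) (header : String) :
    List String → Bool → Bool → Bool → List String → List String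
  | [], _, _, inserted, out => if inserted then out else out ++ section_ ++ [""]
  | l :: ls, skipping, skipped, inserted, out =>
    if skipping && !(PySem.Str.startswith l "## ") then
      irsLoopB section_ header ls true skipped inserted out
    else if !skipped && (PySem.Str.strip l == header) then
      irsLoopB section_ header ls true true inserted out
    else if !inserted && (PySem.Str.strip l == "## Conclusion") then
      irsLoopB section_ header ls false skipped true (out ++ section_ ++ [""] ++ [l])
    else
      irsLoopB section_ header ls false skipped inserted (out ++ [l])

def insert_report_section_py_alt (lines : List String) (section_ : List String) : List String :=
  irsLoopB section_ "## Trade vs Not-Trade Confusion (Top-K=20)" lines false false false []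

-- ===== PRECONDITION & SPEC =====
def Spec_insert_report_section_py (lines : List String) (section_ : List String) (out : List String) : Prop := out = insert_report_section_py_alt lines section_
instance (lines : List String) (section_ : List String) (out : List String) : Decidable (Spec_insert_report_section_py lines section_ out) := by unfold Spec_insert_report_section_py; infer_instance

-- ===== CLAIM (what is proved, stated in full; the proofs are below) =====
def Claim_equal_insert_report_section_py : Prop := ∀ (lines : List String) (section_ : List String), Dom_insert_report_section_py lines section_ → Spec_insert_report_section_py lines section_ (insert_report_section_py lines section_)

-- ===== LEMMAS AND PROOFS =====

-- canonical description both ports are reduced to: remove the first header section, then insert before the first conclusion line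
def irsDropSec (ls : List String) : List String := ls.dropWhile (fun x => !PySem.Str.startswith x "## ")

def irsRem (header : String) : List String → List String
  | [] => []
  | l :: ls => if PySem.Str.strip l = header then irsDropSec ls else l :: irsRem header ls

def irsIns (sec : List String) : List String → List String
  | [] => sec ++ [""]
  | l :: ls =>
      if PySem.Str.strip l = "## Conclusion" then sec ++ [""] ++ l :: ls
      else l :: irsIns sec ls

lemma irsScanEnd_cons (l : String) (ls : List String) (e : Nat) :
    irsScanEnd (l :: ls) (e + 1) = irsScanEnd ls e + 1 := by
  fun_induction irsScanEnd ls e with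
  | case1 e h hsw =>
      rw [irsScanEnd, dif_pos (by simpa using Nat.succ_lt_succ h)]
      simp only [List.getElem_cons_succ]
      rw [if_pos hsw]
  | case2 e h hsw ih =>
      rw [irsScanEnd, dif_pos (by simpa using Nat.succ_lt_succ h)]
      simp only [List.getElem_cons_succ]
      rw [if_neg hsw]
      exact ih
  | case3 e h =>
      rw [irsScanEnd, dif_neg (by simp only [List.length_cons]; omega)]

lemma irsScanEnd_drop : ∀ ls : List String, ls.drop (irsScanEnd ls 0) = irsDropSec ls := by
  intro ls
  induction ls with
  | nil => simp [irsScanEnd, irsDropSec]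
  | cons l ls ih =>
      by_cases h : PySem.Str.startswith l "## " = true
      · have h' : PySem.Chars.startswith l.toList ['#','#',' '] = true := by simpa using h
        rw [irsScanEnd, dif_pos (by simp)]
        simp only [List.getElem_cons_zero]
        rw [if_pos h]
        simp [irsDropSec, h']
      · have h' : PySem.Chars.startswith l.toList ['#','#',' '] = false := by simpa using h
        rw [irsScanEnd, dif_pos (by simp)]
        simp only [List.getElem_cons_zero]
        rw [if_neg h, irsScanEnd_cons, List.drop_succ_cons]
        rw [ih]
        simp [irsDropSec, h']

lemma irsFindIdx_succ (t : String) : ∀ (ls : List String) (i : Nat),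
    irsFindIdx t ls (i + 1) = (irsFindIdx t ls i).map (· + 1) := by
  intro ls
  induction ls with
  | nil => intro i; simp [irsFindIdx]
  | cons l ls ih =>
      intro i
      by_cases h : PySem.Str.strip l = t
      · simp [irsFindIdx, h]
      · simp [irsFindIdx, h, ih (i + 1)]

lemma irsRem_eq (hd : String) : ∀ lines : List String,
    (match irsFindIdx hd lines 0 with
     | none => lines
     | some s => lines.take s ++ lines.drop (irsScanEnd lines (s + 1))) = irsRem hd lines := by
  intro lines
  induction lines with
  | nil => simp [irsFindIdx, irsRem]
  | cons l ls ih =>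
      by_cases h : PySem.Str.strip l = hd
      · simp only [irsFindIdx, h, if_pos, irsRem]
        rw [irsScanEnd_cons]
        simpa using irsScanEnd_drop ls
      · rw [show irsFindIdx hd (l :: ls) 0 = (irsFindIdx hd ls 0).map (· + 1) by
            simp [irsFindIdx, h, irsFindIdx_succ]]
        rw [irsRem, if_neg h, ← ih]
        cases hf : irsFindIdx hd ls 0 with
        | none => simp
        | some j =>
            simp only [Option.map_some]
            rw [irsScanEnd_cons]
            simp [List.take_succ_cons, List.drop_succ_cons]

lemma irsIns_eq (sec : List String) : ∀ ls : List String,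
    (ls.take (match irsFindIdx "## Conclusion" ls 0 with
              | none => ls.length
              | some i => i) ++ sec ++ [""] ++
     ls.drop (match irsFindIdx "## Conclusion" ls 0 with
              | none => ls.length
              | some i => i)) = irsIns sec ls := by
  intro ls
  induction ls with
  | nil => simp [irsFindIdx, irsIns]
  | cons l ls ih =>
      by_cases h : PySem.Str.strip l = "## Conclusion"
      · simp [irsFindIdx, h, irsIns]
      · rw [show irsFindIdx "## Conclusion" (l :: ls) 0 = (irsFindIdx "## Conclusion" ls 0).map (· + 1) by
            simp [irsFindIdx, h, irsFindIdx_succ]]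
        rw [irsIns, if_neg h, ← ih]
        cases hf : irsFindIdx "## Conclusion" ls 0 with
        | none => simp
        | some j => simp

lemma irsLoopB_states (sec : List String) (hd : String) : ∀ (ls out : List String),
    (irsLoopB sec hd ls false false false out = out ++ irsIns sec (irsRem hd ls)) ∧
    (irsLoopB sec hd ls false false true out = out ++ irsRem hd ls) ∧
    (irsLoopB sec hd ls false true false out = out ++ irsIns sec ls) ∧
    (irsLoopB sec hd ls false true true out = out ++ ls) ∧
    (irsLoopB sec hd ls true true false out = out ++ irsIns sec (irsDropSec ls)) ∧
    (irsLoopB sec hd ls true true true out = out ++ irsDropSec ls) := by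
  intro ls
  induction ls with
  | nil => intro out; simp [irsLoopB, irsRem, irsIns, irsDropSec]
  | cons l ls ih =>
      intro out
      by_cases hh : PySem.Str.strip l = hd
      · by_cases hc : PySem.Str.strip l = "## Conclusion"
        · have e : hd = "## Conclusion" := hh.symm.trans hc
          subst e
          by_cases hsw : PySem.Chars.startswith l.toList ['#','#',' '] = true <;>
          refine ⟨?_, ?_, ?_, ?_, ?_, ?_⟩ <;>
          simp [irsLoopB, ih, hsw, hc, irsRem, irsIns, irsDropSec]
        · have hne : ¬ hd = "## Conclusion" := fun e => hc (hh.trans e)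
          by_cases hsw : PySem.Chars.startswith l.toList ['#','#',' '] = true <;>
          refine ⟨?_, ?_, ?_, ?_, ?_, ?_⟩ <;>
          simp [irsLoopB, ih, hsw, hh, hne, irsRem, irsIns, irsDropSec]
      · by_cases hc : PySem.Str.strip l = "## Conclusion" <;>
        [have hne2 : ¬ ("## Conclusion" = hd) := fun e => hh (hc.trans e); have hne2 : True := trivial] <;>
        by_cases hsw : PySem.Chars.startswith l.toList ['#','#',' '] = true <;>
        refine ⟨?_, ?_, ?_, ?_, ?_, ?_⟩ <;>
        simp [irsLoopB, ih, hsw, hh, hc, hne2, irsRem, irsIns, irsDropSec]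

-- ===== VERDICT (by name: the statement is the Claim_ definition above) =====
theorem insert_report_section_py_spec : Claim_equal_insert_report_section_py := by
  intro lines section_ _hDom
  unfold Spec_insert_report_section_py insert_report_section_py insert_report_section_py_alt
  rw [(irsLoopB_states section_ "## Trade vs Not-Trade Confusion (Top-K=20)" lines []).1]
  simp only [List.nil_append]
  have h2 : (match irsFindIdx "## Trade vs Not-Trade Confusion (Top-K=20)" lines 0 with
      | none => lines
      | some s =>
          PySem.List.slice lines none (some (s : Int)) ++
            PySem.List.slice lines (some ((irsScanEnd lines (s + 1) : Nat) : Int)) none)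
      = irsRem "## Trade vs Not-Trade Confusion (Top-K=20)" lines := by
    rw [← irsRem_eq]
    cases irsFindIdx "## Trade vs Not-Trade Confusion (Top-K=20)" lines 0 with
    | none => rfl
    | some s => simp [PySem.List.slice_to_natCast, PySem.List.slice_from_natCast]
  rw [h2]
  rw [← irsIns_eq section_ (irsRem "## Trade vs Not-Trade Confusion (Top-K=20)" lines)]
  cases irsFindIdx "## Conclusion" (irsRem "## Trade vs Not-Trade Confusion (Top-K=20)" lines) 0 with
  | none => simp [PySem.List.slice_to_natCast, PySem.List.slice_from_natCast]
  | some i => simp [PySem.List.slice_to_natCast, PySem.List.slice_from_natCast]
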